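-- pv_equiv track=rewrite | github.com/FernE047/pythonscript | imagem/randomBranch/randomBranchMaker.py | calculate_min_max
-- ===== SOURCE A (Python) =====
-- def calculate_min_max(values: list[int], is_horizontal: bool) -> tuple[int, int]:
--     if is_horizontal:
--         offset_value = 0
--     else:
--         offset_value = 1
--     current_position = 0
--     minimum_position = 0
--     maximum_position = 0
--     for index in range(offset_value, len(values), 2):
--         if index % 2:
--             adjusted_index = index - 1
--         else:
--             adjusted_index = index
--         if adjusted_index % 4 == 0:
--             current_position += values[adjusted_index]
--         else:
--             current_position -= values[adjusted_index]
--         if current_position < minimum_position: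
--             minimum_position = current_position
--         if current_position > maximum_position:
--             maximum_position = current_position
--     return (minimum_position, maximum_position)
-- ===== SOURCE B (Python) =====
-- def calculate_min_max(values: list[int], is_horizontal: bool) -> tuple[int, int]:
--     # Divide and conquer: extract the signed even-index terms, then compute
--     # (sum, min running prefix, max running prefix) by recursive halving with the
--     # segment-tree combine rule: min = min(mnL, sumL + mnR), max = max(mxL, sumL + mxR).
--     # Prefix extremes are seeded with the empty prefix 0, matching A's 0-seeded min/max.
--     k = (len(values) + (1 if is_horizontal else 0)) // 2
--     terms = [values[2 * j] if j % 2 == 0 else -values[2 * j] for j in range(k)]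
--
--     def solve(ts):
--         if not ts:
--             return (0, 0, 0)
--         if len(ts) == 1:
--             t = ts[0]
--             return (t, min(0, t), max(0, t))
--         m = len(ts) // 2
--         sL, mnL, mxL = solve(ts[:m])
--         sR, mnR, mxR = solve(ts[m:])
--         return (sL + sR, min(mnL, sL + mnR), max(mxL, sL + mxR))
--
--     _, mn, mx = solve(terms)
--     return (mn, mx)
-- ===== Notes on version B (the rewrite author's own statement) =====
-- stated objective: alternative
-- what changed: Replaces A's left-to-right fold that inline-updates running min/max with a divide-and-conquer reduction: the signed even-index terms are split recursively in halves and (sum, min-prefix, max-prefix) triples are merged with the segment-tree combine rule min(mnL, sumL+mnR)/max(mxL, sumL+mxR).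
import Mathlib
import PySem

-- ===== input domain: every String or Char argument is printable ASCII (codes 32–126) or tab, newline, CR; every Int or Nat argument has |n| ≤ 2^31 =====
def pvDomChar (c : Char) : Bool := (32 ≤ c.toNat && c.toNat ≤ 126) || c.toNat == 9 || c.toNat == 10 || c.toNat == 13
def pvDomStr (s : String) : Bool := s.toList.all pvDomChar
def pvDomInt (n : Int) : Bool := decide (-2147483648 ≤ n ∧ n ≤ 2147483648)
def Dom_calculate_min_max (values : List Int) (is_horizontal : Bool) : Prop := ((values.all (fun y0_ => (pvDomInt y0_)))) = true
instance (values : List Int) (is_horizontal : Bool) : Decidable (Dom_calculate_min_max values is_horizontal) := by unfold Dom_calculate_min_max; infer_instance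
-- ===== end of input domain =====

-- header: B computes the signed even-index terms and reduces them by divide-and-conquer
-- (merge (sum, min-prefix, max-prefix) triples of halves); A is a single left-to-right fold.


-- ===== PORT A =====
-- literal port of A: one fold over range(offset, len(values), 2) carrying
-- (current_position, minimum_position, maximum_position).
-- values[adjusted_index]: adjusted_index is always in [0, len), so pyGetD is exact here.
def calculate_min_max (values : List Int) (is_horizontal : Bool) : Int × Int :=
  let offset_value : Int := if is_horizontal then 0 else 1
  let s :=
    (PySem.List.pyRange offset_value (values.length : Int) 2).foldl
      (fun (s : Int × Int × Int) (index : Int) =>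
        let adjusted_index : Int := if PySem.Int.mod index 2 ≠ 0 then index - 1 else index
        let current_position : Int :=
          if PySem.Int.mod adjusted_index 4 = 0 then
            s.1 + PySem.List.pyGetD values adjusted_index 0
          else
            s.1 - PySem.List.pyGetD values adjusted_index 0
        let minimum_position : Int := if current_position < s.2.1 then current_position else s.2.1
        let maximum_position : Int := if current_position > s.2.2 then current_position else s.2.2
        (current_position, minimum_position, maximum_position))
      (0, 0, 0)
  (s.2.1, s.2.2)

-- ===== PORT B =====
-- Source B's inner `solve`: divide-and-conquer (sum, min-prefix, max-prefix) of a term list.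
-- ts[:m] / ts[m:] with 0 ≤ m ≤ len are exactly List.take / List.drop; the Nat fuel
-- (initialised to the list length, enough for every recursive call) only makes the
-- recursion structural — the fuel-zero branch is never reached.
def pvSolveF : Nat → List Int → Int × Int × Int
  | _, [] => (0, 0, 0)
  | _, [t] => (t, min 0 t, max 0 t)
  | 0, _ => (0, 0, 0)
  | fuel + 1, a :: b :: ts =>
    let m := (a :: b :: ts).length / 2
    let sL := pvSolveF fuel ((a :: b :: ts).take m)
    let sR := pvSolveF fuel ((a :: b :: ts).drop m)
    (sL.1 + sR.1, min sL.2.1 (sL.1 + sR.2.1), max sL.2.2 (sL.1 + sR.2.2))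

def pvSolve (ts : List Int) : Int × Int × Int := pvSolveF ts.length ts

-- literal port of Source B: k signed terms values[2*j], then the divide-and-conquer solve.
-- len(values) ≥ 0, so Python's nonnegative // 2 is Nat division here; 2*j is always in
-- [0, len), so pyGetD is exact.
def calculate_min_max_alt (values : List Int) (is_horizontal : Bool) : Int × Int :=
  let k : Nat := (values.length + (if is_horizontal then 1 else 0)) / 2
  let terms : List Int :=
    (List.range k).map (fun (j : Nat) =>
      if j % 2 = 0 then PySem.List.pyGetD values (2 * (j : Int)) 0
      else -(PySem.List.pyGetD values (2 * (j : Int)) 0))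
  let s := pvSolve terms
  (s.2.1, s.2.2)

-- ===== PRECONDITION & SPEC =====
def Spec_calculate_min_max (values : List Int) (is_horizontal : Bool) (out : Int × Int) : Prop := out = calculate_min_max_alt values is_horizontal
instance (values : List Int) (is_horizontal : Bool) (out : Int × Int) : Decidable (Spec_calculate_min_max values is_horizontal out) := by unfold Spec_calculate_min_max; infer_instance

-- ===== CLAIM (what is proved, stated in full; the proofs are below) =====
def Claim_equal_calculate_min_max : Prop := ∀ (values : List Int) (is_horizontal : Bool), Dom_calculate_min_max values is_horizontal → Spec_calculate_min_max values is_horizontal (calculate_min_max values is_horizontal)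

-- ===== LEMMAS AND PROOFS =====

-- the signed term values[2*j] read at step j (shared characterisation of both programs)
def pvTerm (values : List Int) (j : Nat) : Int :=
  if j % 2 = 0 then PySem.List.pyGetD values (2 * (j : Int)) 0
  else -(PySem.List.pyGetD values (2 * (j : Int)) 0)

-- running prefix sums of a term list from start c
def pvPrefL : List Int → Int → List Int
  | [], _ => []
  | t :: ts, c => (c + t) :: pvPrefL ts (c + t)

def pvMnp (ts : List Int) : Int := (pvPrefL ts 0).foldl min 0
def pvMxp (ts : List Int) : Int := (pvPrefL ts 0).foldl max 0

theorem stepA_char (ts : List Int) (c mn mx : Int) :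
    ts.foldl (fun (s : Int × Int × Int) t =>
        (s.1 + t,
         if s.1 + t < s.2.1 then s.1 + t else s.2.1,
         if s.1 + t > s.2.2 then s.1 + t else s.2.2)) (c, mn, mx)
      = (c + ts.sum, (pvPrefL ts c).foldl min mn, (pvPrefL ts c).foldl max mx) := by
  induction ts generalizing c mn mx with
  | nil => simp [pvPrefL]
  | cons t ts ih =>
      have hmn : (if c + t < mn then c + t else mn) = min mn (c + t) := by
        rw [min_def]; split_ifs <;> omega
      have hmx : (if c + t > mx then c + t else mx) = max mx (c + t) := by
        rw [max_def]; split_ifs <;> omega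
      simp only [List.foldl_cons, pvPrefL, ih, hmn, hmx, List.sum_cons]
      rw [add_assoc]

theorem prefL_append (l r : List Int) (c : Int) :
    pvPrefL (l ++ r) c = pvPrefL l c ++ pvPrefL r (c + l.sum) := by
  induction l generalizing c with
  | nil => simp [pvPrefL]
  | cons t l ih => simp [pvPrefL, ih]; ring_nf

theorem prefL_shift (ts : List Int) (c b : Int) :
    pvPrefL ts (c + b) = (pvPrefL ts b).map (c + ·) := by
  induction ts generalizing b with
  | nil => simp [pvPrefL]
  | cons t ts ih =>
      simp only [pvPrefL, List.map_cons, add_assoc, ih]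

theorem foldl_min_map_shift (xs : List Int) (a b c : Int) :
    (xs.map (c + ·)).foldl min (min a (c + b)) = min a (c + xs.foldl min b) := by
  induction xs generalizing a b with
  | nil => simp
  | cons x xs ih =>
      simp only [List.map_cons, List.foldl_cons]
      have h : min (min a (c + b)) (c + x) = min a (c + min b x) := by
        rw [min_assoc]; congr 1; rw [min_def, min_def]; split_ifs <;> omega
      rw [h, ih]

theorem foldl_max_map_shift (xs : List Int) (a b c : Int) :
    (xs.map (c + ·)).foldl max (max a (c + b)) = max a (c + xs.foldl max b) := by
  induction xs generalizing a b with
  | nil => simp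
  | cons x xs ih =>
      simp only [List.map_cons, List.foldl_cons]
      have h : max (max a (c + b)) (c + x) = max a (c + max b x) := by
        rw [max_assoc]; congr 1; rw [max_def, max_def]; split_ifs <;> omega
      rw [h, ih]

theorem mnp_le_sum_aux (l : List Int) (a c : Int) :
    (pvPrefL l c).foldl min (min a c) ≤ c + l.sum := by
  induction l generalizing a c with
  | nil => simp [pvPrefL]
  | cons t l ih =>
      simp only [pvPrefL, List.foldl_cons, List.sum_cons]
      have h : min (min a c) (c + t) = min (min a c) (c + t) := rfl
      calc (pvPrefL l (c + t)).foldl min (min (min a c) (c + t)) ≤ (c + t) + l.sum :=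
            ih (min a c) (c + t)
        _ = c + (t + l.sum) := by ring

theorem mxp_ge_sum_aux (l : List Int) (a c : Int) :
    c + l.sum ≤ (pvPrefL l c).foldl max (max a c) := by
  induction l generalizing a c with
  | nil => simp [pvPrefL]
  | cons t l ih =>
      simp only [pvPrefL, List.foldl_cons, List.sum_cons]
      calc c + (t + l.sum) = (c + t) + l.sum := by ring
        _ ≤ (pvPrefL l (c + t)).foldl max (max (max a c) (c + t)) := ih (max a c) (c + t)

theorem mnp_le_sum (l : List Int) : pvMnp l ≤ l.sum := by
  have := mnp_le_sum_aux l 0 0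
  simpa [pvMnp] using this

theorem mxp_ge_sum (l : List Int) : l.sum ≤ pvMxp l := by
  have := mxp_ge_sum_aux l 0 0
  simpa [pvMxp] using this

theorem mnp_append (l r : List Int) :
    pvMnp (l ++ r) = min (pvMnp l) (l.sum + pvMnp r) := by
  have h0 : pvPrefL r ((0 : Int) + l.sum) = pvPrefL r (l.sum + 0) := by norm_num
  have hshift := prefL_shift r l.sum 0
  have hseed : pvMnp l = min (pvMnp l) (l.sum + 0) := by
    have := mnp_le_sum l
    rw [min_def]; split_ifs <;> omega
  calc pvMnp (l ++ r)
      = (pvPrefL l 0 ++ pvPrefL r (0 + l.sum)).foldl min 0 := by rw [pvMnp, prefL_append]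
    _ = (pvPrefL r (l.sum + 0)).foldl min (pvMnp l) := by
        rw [h0, List.foldl_append]; rfl
    _ = ((pvPrefL r 0).map (l.sum + ·)).foldl min (min (pvMnp l) (l.sum + 0)) := by
        rw [hshift, ← hseed]
    _ = min (pvMnp l) (l.sum + pvMnp r) := foldl_min_map_shift _ _ _ _

theorem mxp_append (l r : List Int) :
    pvMxp (l ++ r) = max (pvMxp l) (l.sum + pvMxp r) := by
  have h0 : pvPrefL r ((0 : Int) + l.sum) = pvPrefL r (l.sum + 0) := by norm_num
  have hshift := prefL_shift r l.sum 0
  have hseed : pvMxp l = max (pvMxp l) (l.sum + 0) := by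
    have := mxp_ge_sum l
    rw [max_def]; split_ifs <;> omega
  calc pvMxp (l ++ r)
      = (pvPrefL l 0 ++ pvPrefL r (0 + l.sum)).foldl max 0 := by rw [pvMxp, prefL_append]
    _ = (pvPrefL r (l.sum + 0)).foldl max (pvMxp l) := by
        rw [h0, List.foldl_append]; rfl
    _ = ((pvPrefL r 0).map (l.sum + ·)).foldl max (max (pvMxp l) (l.sum + 0)) := by
        rw [hshift, ← hseed]
    _ = max (pvMxp l) (l.sum + pvMxp r) := foldl_max_map_shift _ _ _ _

theorem solveF_correct (fuel : Nat) : ∀ ts : List Int, ts.length ≤ fuel →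
    pvSolveF fuel ts = (ts.sum, pvMnp ts, pvMxp ts) := by
  induction fuel with
  | zero =>
      intro ts h
      match ts, h with
      | [], _ => simp [pvSolveF, pvMnp, pvMxp, pvPrefL]
  | succ fuel ih =>
      intro ts h
      match ts with
      | [] => simp [pvSolveF, pvMnp, pvMxp, pvPrefL]
      | [t] => simp [pvSolveF, pvMnp, pvMxp, pvPrefL]
      | a :: b :: ts =>
          rw [pvSolveF]
          rw [ih ((a :: b :: ts).take ((a :: b :: ts).length / 2)) (by
            simp only [List.length_take, List.length_cons] at *; omega)]
          rw [ih ((a :: b :: ts).drop ((a :: b :: ts).length / 2)) (by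
            simp only [List.length_drop, List.length_cons] at *; omega)]
          have hsum : (a :: b :: ts).sum
              = ((a :: b :: ts).take ((a :: b :: ts).length / 2)).sum
                + ((a :: b :: ts).drop ((a :: b :: ts).length / 2)).sum := by
            conv_lhs => rw [(List.take_append_drop ((a :: b :: ts).length / 2) (a :: b :: ts)).symm]
            rw [List.sum_append]
          have hmn := mnp_append ((a :: b :: ts).take ((a :: b :: ts).length / 2))
            ((a :: b :: ts).drop ((a :: b :: ts).length / 2))
          have hmx := mxp_append ((a :: b :: ts).take ((a :: b :: ts).length / 2))
            ((a :: b :: ts).drop ((a :: b :: ts).length / 2))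
          rw [List.take_append_drop] at hmn hmx
          rw [hsum, hmn, hmx]

theorem solve_correct (ts : List Int) : pvSolve ts = (ts.sum, pvMnp ts, pvMxp ts) :=
  solveF_correct ts.length ts (le_refl _)

-- range(offset, len, 2) as a mapped List.range, with the exact element count of each loop
theorem range_h (values : List Int) :
    PySem.List.pyRange 0 (values.length : Int) 2
      = (List.range ((values.length + 1) / 2)).map (fun (j : Nat) => 2 * (j : Int)) := by
  rw [PySem.List.pyRange_of_pos _ _ (by norm_num)]
  have : (if (0:Int) < (values.length : Int)
      then (((values.length : Int) - 0 + 2 - 1) / 2).toNat else 0) = (values.length + 1) / 2 := by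
    split_ifs with h <;> omega
  rw [this]
  exact List.map_congr_left (fun j _ => by ring)

theorem range_v (values : List Int) :
    PySem.List.pyRange 1 (values.length : Int) 2
      = (List.range (values.length / 2)).map (fun (j : Nat) => 1 + 2 * (j : Int)) := by
  rw [PySem.List.pyRange_of_pos _ _ (by norm_num)]
  have : (if (1:Int) < (values.length : Int)
      then (((values.length : Int) - 1 + 2 - 1) / 2).toNat else 0) = values.length / 2 := by
    split_ifs with h <;> omega
  rw [this]

-- A's loop body at index 2*j (horizontal) / 1+2*j (vertical) is the term fold of stepA_char
theorem bodyA_h (values : List Int) :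
    (fun (s : Int × Int × Int) (j : Nat) =>
      (fun (s : Int × Int × Int) (index : Int) =>
        let adjusted_index : Int := if PySem.Int.mod index 2 ≠ 0 then index - 1 else index
        let current_position : Int :=
          if PySem.Int.mod adjusted_index 4 = 0 then
            s.1 + PySem.List.pyGetD values adjusted_index 0
          else
            s.1 - PySem.List.pyGetD values adjusted_index 0
        (current_position,
         if current_position < s.2.1 then current_position else s.2.1,
         if current_position > s.2.2 then current_position else s.2.2)) s (2 * (j : Int)))
    = (fun (s : Int × Int × Int) (j : Nat) =>
        (s.1 + pvTerm values j,
         if s.1 + pvTerm values j < s.2.1 then s.1 + pvTerm values j else s.2.1,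
         if s.1 + pvTerm values j > s.2.2 then s.1 + pvTerm values j else s.2.2)) := by
  funext s j
  have h4 : ((4:Int) ∣ 2 * (j : Int)) = (j % 2 = 0) := by
    simp only [eq_iff_iff]; omega
  by_cases hj : j % 2 = 0 <;>
    simp [pvTerm, h4, hj, sub_eq_add_neg]

theorem bodyA_v (values : List Int) :
    (fun (s : Int × Int × Int) (j : Nat) =>
      (fun (s : Int × Int × Int) (index : Int) =>
        let adjusted_index : Int := if PySem.Int.mod index 2 ≠ 0 then index - 1 else index
        let current_position : Int :=
          if PySem.Int.mod adjusted_index 4 = 0 then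
            s.1 + PySem.List.pyGetD values adjusted_index 0
          else
            s.1 - PySem.List.pyGetD values adjusted_index 0
        (current_position,
         if current_position < s.2.1 then current_position else s.2.1,
         if current_position > s.2.2 then current_position else s.2.2)) s (1 + 2 * (j : Int)))
    = (fun (s : Int × Int × Int) (j : Nat) =>
        (s.1 + pvTerm values j,
         if s.1 + pvTerm values j < s.2.1 then s.1 + pvTerm values j else s.2.1,
         if s.1 + pvTerm values j > s.2.2 then s.1 + pvTerm values j else s.2.2)) := by
  funext s j
  have hadj : (1 : Int) + 2 * (j : Int) - 1 = 2 * (j : Int) := by ring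
  have h4 : ((4:Int) ∣ 2 * (j : Int)) = (j % 2 = 0) := by
    simp only [eq_iff_iff]; omega
  by_cases hj : j % 2 = 0 <;>
    simp [pvTerm, hadj, h4, hj, sub_eq_add_neg]

-- ===== VERDICT (by name: the statement is the Claim_ definition above) =====
theorem calculate_min_max_spec : Claim_equal_calculate_min_max := by
  intro values is_horizontal _
  show calculate_min_max values is_horizontal = calculate_min_max_alt values is_horizontal
  have hfold : ∀ k : Nat,
      (List.range k).foldl
        (fun (s : Int × Int × Int) (j : Nat) =>
          (s.1 + pvTerm values j,
           if s.1 + pvTerm values j < s.2.1 then s.1 + pvTerm values j else s.2.1,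
           if s.1 + pvTerm values j > s.2.2 then s.1 + pvTerm values j else s.2.2))
        ((0 : Int), (0 : Int), (0 : Int))
      = ((List.range k).map (pvTerm values)).foldl
          (fun (s : Int × Int × Int) (t : Int) =>
            (s.1 + t,
             if s.1 + t < s.2.1 then s.1 + t else s.2.1,
             if s.1 + t > s.2.2 then s.1 + t else s.2.2))
          ((0 : Int), (0 : Int), (0 : Int)) := by
    intro k; rw [List.foldl_map]
  cases is_horizontal
  · -- vertical: offset 1, k = len // 2
    simp only [calculate_min_max, calculate_min_max_alt, Bool.false_eq_true, if_false,
      range_v, List.foldl_map]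
    rw [bodyA_v, hfold, stepA_char, solve_correct]
    rfl
  · -- horizontal: offset 0, k = (len + 1) // 2
    simp only [calculate_min_max, calculate_min_max_alt, if_true, range_h,
      List.foldl_map]
    rw [bodyA_h, hfold, stepA_char, solve_correct]
    rfl
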